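-- pv_equiv track=rewrite | github.com/xinli2/Word-Search | dictionary_grid.py | build_rect
-- ===== SOURCE A (Python) =====
-- def build_rect(wid, hei):
--     assert wid >= 3
--     assert hei >= 3
--     lst=[]
--     data=[]
--     new_data ={}
--     lst.append(' ')
--     for index in range(wid-2):
--         lst.append('T')
--     lst.append(' ')
--     data.append(lst)
--
--     for i in range(hei-1):
--         if i >= 1:
--             lst =[]
--             for j in range (wid):
--                 if j<1:
--                     lst.append('L')
--                 elif j>(wid-2):
--                     lst.append('R')
--                 else:
--                     lst.append('.')
--             data.append(lst)
--
--     lst= []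
--     lst.append(' ')
--     for g in range(wid-2):
--         lst.append('B')
--     lst.append(' ')
--     data.append(lst)
--
--     for y in range(len(data)):
--         for x in range(len(data[y])):
--             new_data[(x,y)] = data[y][x]
--
--
--     return new_data
-- ===== SOURCE B (Python) =====
-- def build_rect(wid, hei):
--     assert wid >= 3
--     assert hei >= 3
--     # painter's algorithm: fill the whole grid with '.', then paint each
--     # side over it, and finally the four corners
--     new_data = {(x, y): '.' for y in range(hei) for x in range(wid)}
--     for x in range(wid):
--         new_data[(x, 0)] = 'T'
--     for x in range(wid):
--         new_data[(x, hei - 1)] = 'B'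
--     for y in range(hei):
--         new_data[(0, y)] = 'L'
--     for y in range(hei):
--         new_data[(wid - 1, y)] = 'R'
--     for c in ((0, 0), (wid - 1, 0), (0, hei - 1), (wid - 1, hei - 1)):
--         new_data[c] = ' '
--     return new_data
-- ===== Notes on version B (the rewrite author's own statement) =====
-- stated objective: alternative
-- what changed: B uses a painter's algorithm: it fills the whole grid with '.' and then paints the top/bottom rows, left/right columns and finally the corners over it, instead of A's building of per-row character lists that are then flattened into the dict.
import Mathlib
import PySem

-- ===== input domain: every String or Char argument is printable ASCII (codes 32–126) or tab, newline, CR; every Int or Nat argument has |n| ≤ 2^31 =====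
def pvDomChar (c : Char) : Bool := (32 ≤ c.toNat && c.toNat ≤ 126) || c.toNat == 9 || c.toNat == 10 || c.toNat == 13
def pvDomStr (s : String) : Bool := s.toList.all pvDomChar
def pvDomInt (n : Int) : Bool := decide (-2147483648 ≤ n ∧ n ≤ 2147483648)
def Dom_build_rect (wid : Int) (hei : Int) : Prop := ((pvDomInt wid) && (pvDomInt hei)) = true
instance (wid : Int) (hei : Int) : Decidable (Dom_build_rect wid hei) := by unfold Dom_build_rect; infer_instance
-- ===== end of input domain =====

-- B replaces A's row-list building with a painter's algorithm: fill the grid with '.',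
-- then paint the four sides and finally the corners over it (objective: alternative).

-- ===== PORT A =====
-- literal transliteration of A; data[y]/data[y][x] are always in range in the loops, ported
-- with pyGetD (exact for the in-range indices the loops produce).
def build_rect (wid : Int) (hei : Int) : List (Int × Int × String) :=
  let lst := ([] : List String) ++ [" "]
  let lst := (PySem.List.pyRange 0 (wid - 2) 1).foldl (fun l _ => l ++ ["T"]) lst
  let lst := lst ++ [" "]
  let data := ([] : List (List String)) ++ [lst]
  let data := (PySem.List.pyRange 0 (hei - 1) 1).foldl (fun d i =>
      if i ≥ 1 then
        d ++ [(PySem.List.pyRange 0 wid 1).foldl (fun l j =>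
          l ++ [if j < 1 then "L" else if j > wid - 2 then "R" else "."]) []]
      else d) data
  let lst2 := ([] : List String) ++ [" "]
  let lst2 := (PySem.List.pyRange 0 (wid - 2) 1).foldl (fun l _ => l ++ ["B"]) lst2
  let lst2 := lst2 ++ [" "]
  let data := data ++ [lst2]
  let nd := (PySem.List.pyRange 0 (data.length : Int) 1).foldl (fun nd y =>
      (PySem.List.pyRange 0 ((PySem.List.pyGetD data y []).length : Int) 1).foldl (fun nd x =>
        nd.insert (x, y) (PySem.List.pyGetD (PySem.List.pyGetD data y []) x " ")) nd)
    (PySem.Dict.empty : PySem.Dict (Int × Int) String)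
  nd.items.map (fun p => (p.1.1, p.1.2, p.2))

-- ===== PORT B =====
def build_rect_alt (wid : Int) (hei : Int) : List (Int × Int × String) :=
  let d := (PySem.List.pyRange 0 hei 1).foldl (fun d y =>
      (PySem.List.pyRange 0 wid 1).foldl (fun d x => d.insert (x, y) ".") d)
    (PySem.Dict.empty : PySem.Dict (Int × Int) String)
  let d := (PySem.List.pyRange 0 wid 1).foldl (fun d x => d.insert (x, 0) "T") d
  let d := (PySem.List.pyRange 0 wid 1).foldl (fun d x => d.insert (x, hei - 1) "B") d
  let d := (PySem.List.pyRange 0 hei 1).foldl (fun d y => d.insert (0, y) "L") d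
  let d := (PySem.List.pyRange 0 hei 1).foldl (fun d y => d.insert (wid - 1, y) "R") d
  let d := [((0:Int), (0:Int)), (wid - 1, 0), (0, hei - 1), (wid - 1, hei - 1)].foldl
      (fun d c => d.insert c " ") d
  d.items.map (fun p => (p.1.1, p.1.2, p.2))

-- ===== PRECONDITION & SPEC =====
-- A's (and B's) asserts raise AssertionError for wid < 3 or hei < 3; exactly those inputs are excluded.
def Pre_build_rect (wid : Int) (hei : Int) : Prop := 3 ≤ wid ∧ 3 ≤ hei
instance (wid : Int) (hei : Int) : Decidable (Pre_build_rect wid hei) := by unfold Pre_build_rect; infer_instance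
def pvWitness_build_rect : Int × Int := (3, 3)

def Spec_build_rect (wid : Int) (hei : Int) (out : List (Int × Int × String)) : Prop := out = build_rect_alt wid hei
instance (wid : Int) (hei : Int) (out : List (Int × Int × String)) : Decidable (Spec_build_rect wid hei out) := by unfold Spec_build_rect; infer_instance

-- ===== CLAIM (what is proved, stated in full; the proofs are below) =====
def Claim_equal_build_rect : Prop := ∀ (wid : Int) (hei : Int), Dom_build_rect wid hei → Pre_build_rect wid hei → Spec_build_rect wid hei (build_rect wid hei)

-- ===== LEMMAS AND PROOFS =====

-- the cell character both programs end up storing at (x, y)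
def pvCell (wid : Int) (hei : Int) (x : Int) (y : Int) : String :=
  if y = 0 ∨ y = hei - 1 then
    if x = 0 ∨ x = wid - 1 then " " else if y = 0 then "T" else "B"
  else if x = 0 then "L" else if x = wid - 1 then "R" else "."

-- a border row (" ", c, …, c, " ") written as a function of the column index
theorem pv_border_row (c : String) (w : Int) (hw : 3 ≤ w) :
    [" "] ++ (PySem.List.pyRange 0 (w - 2) 1).map (fun _ => c) ++ [" "] =
      (PySem.List.pyRange 0 w 1).map (fun x => if x = 0 ∨ x = w - 1 then " " else c) := by
  have h0 : (0:Int) < w := by omega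
  have hr : PySem.List.pyRange 1 w 1 = PySem.List.pyRange 1 (w - 1) 1 ++ [w - 1] := by
    have h := PySem.List.pyRange_one_succ_right (a := 1) (b := w - 1) (by omega)
    rw [show w - 1 + 1 = w from by omega] at h
    exact h
  rw [PySem.List.pyRange_one_cons h0, zero_add, hr, List.map_cons, List.map_append,
      List.map_singleton]
  rw [if_pos (by omega : (0:Int) = 0 ∨ (0:Int) = w - 1),
      if_pos (by omega : w - 1 = 0 ∨ w - 1 = w - 1)]
  have e3 : (PySem.List.pyRange 1 (w - 1) 1).map
      (fun x => if x = 0 ∨ x = w - 1 then " " else c) =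
      (PySem.List.pyRange 1 (w - 1) 1).map (fun _ => c) := by
    apply List.map_congr_left
    intro x hx
    rw [PySem.List.mem_pyRange_one] at hx
    rw [if_neg (by omega : ¬(x = 0 ∨ x = w - 1))]
  have e4 : (PySem.List.pyRange 0 (w - 2) 1).map (fun _ => c) =
      (PySem.List.pyRange 1 (w - 1) 1).map (fun _ => c) := by
    rw [List.map_const', List.map_const', PySem.List.length_pyRange_one,
        PySem.List.length_pyRange_one]
    congr 1
    omega
  rw [e3, e4]
  simp

-- a middle row as a function of the column index
theorem pv_mid_row (w hei y : Int) (hy1 : 1 ≤ y) (hy2 : y < hei - 1) :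
    (PySem.List.pyRange 0 w 1).map
        (fun j => if j < 1 then "L" else if j > w - 2 then "R" else ".") =
      (PySem.List.pyRange 0 w 1).map (fun x => pvCell w hei x y) := by
  apply List.map_congr_left
  intro x hx
  rw [PySem.List.mem_pyRange_one] at hx
  unfold pvCell
  rw [if_neg (by omega : ¬(y = 0 ∨ y = hei - 1))]
  by_cases h0 : x = 0
  · rw [if_pos (by omega : x < 1), if_pos h0]
  · rw [if_neg (by omega : ¬ x < 1), if_neg h0]
    by_cases h1 : x = w - 1
    · rw [if_pos (by omega : x > w - 2), if_pos h1]
    · rw [if_neg (by omega : ¬ x > w - 2), if_neg h1]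

-- A's data list is the coordinate-indexed grid of pvCell
theorem pv_data_eq (wid hei : Int) (hw : 3 ≤ wid) (hh : 3 ≤ hei) :
    ([" "] ++ (PySem.List.pyRange 0 (wid - 2) 1).map (fun _ => ("T" : String)) ++ [" "]) ::
        (((PySem.List.pyRange 0 (hei - 1) 1).filter (fun i => decide (1 ≤ i))).map
          (fun _ => (PySem.List.pyRange 0 wid 1).map
            (fun j => if j < 1 then "L" else if j > wid - 2 then "R" else ".")) ++
        [[" "] ++ (PySem.List.pyRange 0 (wid - 2) 1).map (fun _ => ("B" : String)) ++ [" "]]) =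
      (PySem.List.pyRange 0 hei 1).map (fun y =>
        (PySem.List.pyRange 0 wid 1).map (fun x => pvCell wid hei x y)) := by
  have hr : PySem.List.pyRange 1 hei 1 = PySem.List.pyRange 1 (hei - 1) 1 ++ [hei - 1] := by
    have h := PySem.List.pyRange_one_succ_right (a := 1) (b := hei - 1) (by omega)
    rw [show hei - 1 + 1 = hei from by omega] at h
    exact h
  rw [PySem.List.pyRange_one_cons (by omega : (0:Int) < hei), zero_add, hr, List.map_cons,
      List.map_append, List.map_singleton]
  have hf : (PySem.List.pyRange 0 (hei - 1) 1).filter (fun i => decide (1 ≤ i)) =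
      PySem.List.pyRange 1 (hei - 1) 1 := by
    rw [PySem.List.pyRange_one_cons (by omega : (0:Int) < hei - 1), zero_add,
        List.filter_cons_of_neg (by simp)]
    apply List.filter_eq_self.mpr
    intro a ha
    rw [PySem.List.mem_pyRange_one] at ha
    simpa using ha.1
  rw [hf]
  congr 1
  · -- top row
    rw [pv_border_row "T" wid hw]
    apply List.map_congr_left
    intro x _
    simp [pvCell]
  congr 1
  · -- middle rows
    apply List.map_congr_left
    intro y hy
    rw [PySem.List.mem_pyRange_one] at hy
    exact pv_mid_row wid hei y hy.1 hy.2
  · -- bottom row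
    rw [pv_border_row "B" wid hw]
    congr 1
    apply List.map_congr_left
    intro x _
    simp [pvCell, show hei - 1 ≠ 0 from by omega]

-- the nested insertion loop over strictly fresh keys appends row after row
theorem pv_grid_fold (C : Int) (g : Int → Int → String) (n : Nat) :
    ∀ (a b : Int), (b - a).toNat = n → ∀ (d : PySem.Dict (Int × Int) String),
    (∀ p ∈ d.items, p.1.2 < a) →
    ((PySem.List.pyRange a b 1).foldl (fun nd y =>
        (PySem.List.pyRange 0 C 1).foldl (fun nd x => nd.insert (x, y) (g x y)) nd) d).items =
      d.items ++ (PySem.List.pyRange a b 1).flatMap (fun y =>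
        (PySem.List.pyRange 0 C 1).map (fun x => ((x, y), g x y))) := by
  induction n with
  | zero =>
    intro a b hn d _
    rw [PySem.List.pyRange_one_eq_nil (by omega : b ≤ a)]
    simp
  | succ m ih =>
    intro a b hn d hd
    have hab : a < b := by omega
    rw [PySem.List.pyRange_one_cons hab, List.foldl_cons, List.flatMap_cons]
    have hfresh : ∀ x ∈ PySem.List.pyRange 0 C 1, d.contains (x, a) = false := by
      intro x _
      by_contra hcon
      have hcon' : d.contains (x, a) = true := by
        cases h : d.contains (x, a) with
        | false => exact absurd h hcon
        | true => rfl
      rw [PySem.Dict.contains_iff_mem_keys] at hcon'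
      obtain ⟨p, hp, hp1⟩ := List.mem_map.mp hcon'
      have := hd p hp
      rw [hp1] at this
      omega
    have hnodup : ((PySem.List.pyRange 0 C 1).map (fun x => (x, a))).Nodup :=
      (PySem.List.nodup_pyRange_one 0 C).map (fun x y h => congrArg Prod.fst h)
    have hinner := PySem.Dict.items_foldl_insert_fresh (l := PySem.List.pyRange 0 C 1)
      (k := fun x => (x, a)) (v := fun x => g x a) (d := d) hfresh hnodup
    have hdnext : ∀ p ∈ ((PySem.List.pyRange 0 C 1).foldl
        (fun nd x => nd.insert (x, a) (g x a)) d).items, p.1.2 < a + 1 := by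
      intro p hp
      rw [hinner, List.mem_append] at hp
      cases hp with
      | inl h => have := hd p h; omega
      | inr h =>
        obtain ⟨x, _, hx⟩ := List.mem_map.mp h
        rw [← hx]
        exact lt_add_one a
    rw [ih (a + 1) b (by omega) _ hdnext, hinner, List.append_assoc]

-- A's items list, in insertion (row-major) order
theorem pv_A_items (wid hei : Int) (hw : 3 ≤ wid) (hh : 3 ≤ hei) :
    build_rect wid hei =
      ((PySem.List.pyRange 0 hei 1).flatMap (fun y =>
        (PySem.List.pyRange 0 wid 1).map (fun x => ((x, y), pvCell wid hei x y)))).map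
        (fun p => (p.1.1, p.1.2, p.2)) := by
  unfold build_rect
  simp only [List.nil_append, PySem.List.foldl_append_singleton_eq_map,
    PySem.List.foldl_append_ite, List.cons_append, ge_iff_le]
  have hdata := pv_data_eq wid hei hw hh
  simp only [List.cons_append, List.nil_append] at hdata
  rw [hdata]
  set grid := (PySem.List.pyRange 0 hei 1).map (fun y =>
      (PySem.List.pyRange 0 wid 1).map (fun x => pvCell wid hei x y)) with hgrid
  have hlen : ((grid.length : Int)) = hei := by
    rw [hgrid, List.length_map, PySem.List.length_pyRange_one]
    omega
  rw [hlen]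
  have hbody : (PySem.List.pyRange 0 hei 1).foldl (fun nd y =>
      (PySem.List.pyRange 0 ((PySem.List.pyGetD grid y []).length : Int) 1).foldl (fun nd x =>
        nd.insert (x, y) (PySem.List.pyGetD (PySem.List.pyGetD grid y []) x " ")) nd)
      (PySem.Dict.empty : PySem.Dict (Int × Int) String) =
      (PySem.List.pyRange 0 hei 1).foldl (fun nd y =>
      (PySem.List.pyRange 0 wid 1).foldl (fun nd x =>
        nd.insert (x, y) (pvCell wid hei x y)) nd) PySem.Dict.empty := by
    apply PySem.List.foldl_congr_mem
    intro acc y hy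
    rw [PySem.List.mem_pyRange_one] at hy
    have hrow : PySem.List.pyGetD grid y [] =
        (PySem.List.pyRange 0 wid 1).map (fun x => pvCell wid hei x y) := by
      rw [hgrid]
      exact PySem.List.pyGetD_map_pyRange_of_nonneg _ hei y [] hy.1 hy.2
    rw [hrow, List.length_map, PySem.List.length_pyRange_one,
        show (((wid - 0).toNat : Int)) = wid from by omega]
    apply PySem.List.foldl_congr_mem
    intro acc2 x hx
    rw [PySem.List.mem_pyRange_one] at hx
    rw [PySem.List.pyGetD_map_pyRange_of_nonneg _ wid x " " hx.1 hx.2]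
  rw [hbody, pv_grid_fold wid (pvCell wid hei) (hei.toNat) 0 hei (by omega) _
      (by simp [PySem.Dict.empty])]
  simp [PySem.Dict.empty]

-- lookup after a painting pass that writes one constant value at keys (k b)
theorem pv_getD_paint {β : Type} (l : List β) (k : β → Int × Int) (v : String) :
    ∀ (d : PySem.Dict (Int × Int) String) (p : Int × Int) (dflt : String),
    ((l.foldl (fun d b => d.insert (k b) v) d).getD p dflt) =
      if p ∈ l.map k then v else d.getD p dflt := by
  induction l with
  | nil => intro d p dflt; simp
  | cons a t ih =>
    intro d p dflt
    rw [List.foldl_cons, ih, List.map_cons]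
    by_cases h : p ∈ t.map k
    · simp [h]
    · rw [if_neg h, PySem.Dict.getD_insert]
      by_cases h2 : p = k a <;> simp [h2, h]

-- lookup after the initial '.' fill
theorem pv_getD_grid (W : Int) (l : List Int) :
    ∀ (d : PySem.Dict (Int × Int) String) (p : Int × Int) (dflt : String),
    ((l.foldl (fun d y =>
        (PySem.List.pyRange 0 W 1).foldl (fun d x => d.insert (x, y) ".") d) d).getD p dflt) =
      if p ∈ l.flatMap (fun y => (PySem.List.pyRange 0 W 1).map (fun x => (x, y)))
      then "." else d.getD p dflt := by
  induction l with
  | nil => intro d p dflt; simp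
  | cons a t ih =>
    intro d p dflt
    rw [List.foldl_cons, ih, List.flatMap_cons]
    by_cases h : p ∈ t.flatMap (fun y => (PySem.List.pyRange 0 W 1).map (fun x => (x, y)))
    · simp [h]
    · rw [if_neg h, pv_getD_paint]
      by_cases h2 : p ∈ (PySem.List.pyRange 0 W 1).map (fun x => (x, a)) <;>
        simp [h2, h]

-- a painting pass at keys that are already present leaves the key list unchanged
theorem pv_keys_paint {β : Type} (l : List β) (k : β → Int × Int) (v : String)
    (d : PySem.Dict (Int × Int) String) (h : ∀ b ∈ l, k b ∈ d.keys) :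
    (l.foldl (fun d b => d.insert (k b) v) d).keys = d.keys := by
  rw [PySem.Dict.keys_foldl_insert_key, PySem.Set.update_eq_append_filter]
  have he : (PySem.Set.ofList (l.map k)).filter
      (fun y => !(PySem.Set.contains d.keys y)) = [] := by
    apply List.filter_eq_nil_iff.mpr
    intro a ha
    rw [PySem.Set.mem_ofList] at ha
    obtain ⟨b, hb, rfl⟩ := List.mem_map.mp ha
    simpa using h b hb
  rw [he, List.append_nil]

-- the key list of the initial '.' fill
theorem pv_keys_grid (wid hei : Int) :
    (((PySem.List.pyRange 0 hei 1).foldl (fun d y =>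
        (PySem.List.pyRange 0 wid 1).foldl (fun d x => d.insert (x, y) ".") d)
      (PySem.Dict.empty : PySem.Dict (Int × Int) String)).keys) =
      (PySem.List.pyRange 0 hei 1).flatMap (fun y =>
        (PySem.List.pyRange 0 wid 1).map (fun x => (x, y))) := by
  have h := pv_grid_fold wid (fun _ _ => ".") hei.toNat 0 hei
    (show ((hei - 0).toNat = hei.toNat) by omega) PySem.Dict.empty
    (by simp [PySem.Dict.empty])
  simp only [PySem.Dict.keys, h]
  simp [List.map_flatMap, List.map_map, Function.comp_def, PySem.Dict.empty]

-- that key list has no duplicates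
theorem pv_nodup_keys_grid (wid hei : Int) :
    ((PySem.List.pyRange 0 hei 1).flatMap (fun y =>
        (PySem.List.pyRange 0 wid 1).map (fun x => (x, y)))).Nodup := by
  apply List.nodup_flatMap.2
  constructor
  · intro y _
    exact (PySem.List.nodup_pyRange_one 0 wid).map (fun a b h => congrArg Prod.fst h)
  · refine (PySem.List.nodup_pyRange_one 0 hei).imp ?_
    intro y z hyz p hp hq
    obtain ⟨a, _, rfl⟩ := List.mem_map.mp hp
    obtain ⟨b, _, hb⟩ := List.mem_map.mp hq
    have hzy : z = y := by simpa using congrArg Prod.snd hb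
    exact hyz hzy.symm

-- B's items list equals A's
theorem pv_B_items (wid hei : Int) (hw : 3 ≤ wid) (hh : 3 ≤ hei) :
    build_rect_alt wid hei =
      ((PySem.List.pyRange 0 hei 1).flatMap (fun y =>
        (PySem.List.pyRange 0 wid 1).map (fun x => ((x, y), pvCell wid hei x y)))).map
        (fun p => (p.1.1, p.1.2, p.2)) := by
  unfold build_rect_alt
  dsimp only
  set d0 := (PySem.List.pyRange 0 hei 1).foldl (fun d y =>
      (PySem.List.pyRange 0 wid 1).foldl (fun d x => d.insert (x, y) ".") d)
    (PySem.Dict.empty : PySem.Dict (Int × Int) String) with hd0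
  set K := (PySem.List.pyRange 0 hei 1).flatMap (fun y =>
      (PySem.List.pyRange 0 wid 1).map (fun x => ((x : Int), (y : Int)))) with hK
  have hmemK : ∀ x y : Int, ((x, y) ∈ K) ↔ (0 ≤ x ∧ x < wid ∧ 0 ≤ y ∧ y < hei) := by
    intro x y
    simp only [hK, List.mem_flatMap, List.mem_map, PySem.List.mem_pyRange_one, Prod.mk.injEq]
    constructor
    · rintro ⟨y', hy', x', hx', rfl, rfl⟩
      exact ⟨hx'.1, hx'.2, hy'.1, hy'.2⟩
    · rintro ⟨h1, h2, h3, h4⟩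
      exact ⟨y, ⟨h3, h4⟩, x, ⟨h1, h2⟩, rfl, rfl⟩
  have hk0 : d0.keys = K := pv_keys_grid wid hei
  set d1 := (PySem.List.pyRange 0 wid 1).foldl (fun d x => d.insert (x, 0) "T") d0 with hd1
  set d2 := (PySem.List.pyRange 0 wid 1).foldl (fun d x => d.insert (x, hei - 1) "B") d1 with hd2
  set d3 := (PySem.List.pyRange 0 hei 1).foldl (fun d y => d.insert (0, y) "L") d2 with hd3
  set d4 := (PySem.List.pyRange 0 hei 1).foldl (fun d y => d.insert (wid - 1, y) "R") d3 with hd4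
  set d5 := [((0:Int), (0:Int)), (wid - 1, 0), (0, hei - 1), (wid - 1, hei - 1)].foldl
      (fun d c => d.insert c " ") d4 with hd5
  have hk1 : d1.keys = K := by
    have hp : ∀ b ∈ PySem.List.pyRange 0 wid 1, ((b, (0:Int)) ∈ d0.keys) := by
      intro b hb
      rw [PySem.List.mem_pyRange_one] at hb
      rw [hk0]
      exact (hmemK b 0).mpr (by omega)
    rw [hd1, pv_keys_paint _ _ _ _ hp, hk0]
  have hk2 : d2.keys = K := by
    have hp : ∀ b ∈ PySem.List.pyRange 0 wid 1, ((b, hei - 1) ∈ d1.keys) := by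
      intro b hb
      rw [PySem.List.mem_pyRange_one] at hb
      rw [hk1]
      exact (hmemK b (hei - 1)).mpr (by omega)
    rw [hd2, pv_keys_paint _ _ _ _ hp, hk1]
  have hk3 : d3.keys = K := by
    have hp : ∀ b ∈ PySem.List.pyRange 0 hei 1, (((0:Int), b) ∈ d2.keys) := by
      intro b hb
      rw [PySem.List.mem_pyRange_one] at hb
      rw [hk2]
      exact (hmemK 0 b).mpr (by omega)
    rw [hd3, pv_keys_paint _ _ _ _ hp, hk2]
  have hk4 : d4.keys = K := by
    have hp : ∀ b ∈ PySem.List.pyRange 0 hei 1, ((wid - 1, b) ∈ d3.keys) := by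
      intro b hb
      rw [PySem.List.mem_pyRange_one] at hb
      rw [hk3]
      exact (hmemK (wid - 1) b).mpr (by omega)
    rw [hd4, pv_keys_paint _ _ _ _ hp, hk3]
  have hcon : ∀ (d' : PySem.Dict (Int × Int) String) (c : Int × Int),
      d'.keys = K → c ∈ K → d'.contains c = true := by
    intro d' c h hc
    rw [PySem.Dict.contains_iff_mem_keys, h]
    exact hc
  have e1 : (d4.insert ((0:Int), (0:Int)) " ").keys = K := by
    rw [PySem.Dict.keys_insert_of_contains _ _ (hcon d4 _ hk4 ((hmemK 0 0).mpr (by omega))), hk4]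
  have e2 : ((d4.insert ((0:Int), (0:Int)) " ").insert (wid - 1, (0:Int)) " ").keys = K := by
    rw [PySem.Dict.keys_insert_of_contains _ _ (hcon _ _ e1 ((hmemK (wid - 1) 0).mpr (by omega))), e1]
  have e3 : (((d4.insert ((0:Int), (0:Int)) " ").insert (wid - 1, (0:Int)) " ").insert
      ((0:Int), hei - 1) " ").keys = K := by
    rw [PySem.Dict.keys_insert_of_contains _ _ (hcon _ _ e2 ((hmemK 0 (hei - 1)).mpr (by omega))), e2]
  have hk5 : d5.keys = K := by
    rw [hd5]
    simp only [List.foldl_cons, List.foldl_nil]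
    rw [PySem.Dict.keys_insert_of_contains _ _
      (hcon _ _ e3 ((hmemK (wid - 1) (hei - 1)).mpr (by omega))), e3]
  have hget : ∀ x y : Int, 0 ≤ x → x < wid → 0 ≤ y → y < hei →
      d5.getD (x, y) "." = pvCell wid hei x y := by
    intro x y hx1 hx2 hy1 hy2
    have hR : ((x, y) ∈ (PySem.List.pyRange 0 hei 1).map (fun y' => ((wid - 1 : Int), y'))) ↔
        x = wid - 1 := by
      simp only [List.mem_map, PySem.List.mem_pyRange_one, Prod.mk.injEq]
      constructor
      · rintro ⟨y', _, h, _⟩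
        omega
      · intro h
        exact ⟨y, ⟨hy1, hy2⟩, by omega, rfl⟩
    have hL : ((x, y) ∈ (PySem.List.pyRange 0 hei 1).map (fun y' => ((0 : Int), y'))) ↔
        x = 0 := by
      simp only [List.mem_map, PySem.List.mem_pyRange_one, Prod.mk.injEq]
      constructor
      · rintro ⟨y', _, h, _⟩
        omega
      · intro h
        exact ⟨y, ⟨hy1, hy2⟩, by omega, rfl⟩
    have hB : ((x, y) ∈ (PySem.List.pyRange 0 wid 1).map (fun x' => (x', hei - 1))) ↔
        y = hei - 1 := by
      simp only [List.mem_map, PySem.List.mem_pyRange_one, Prod.mk.injEq]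
      constructor
      · rintro ⟨x', _, _, h⟩
        omega
      · intro h
        exact ⟨x, ⟨hx1, hx2⟩, rfl, by omega⟩
    have hT : ((x, y) ∈ (PySem.List.pyRange 0 wid 1).map (fun x' => (x', (0 : Int)))) ↔
        y = 0 := by
      simp only [List.mem_map, PySem.List.mem_pyRange_one, Prod.mk.injEq]
      constructor
      · rintro ⟨x', _, _, h⟩
        omega
      · intro h
        exact ⟨x, ⟨hx1, hx2⟩, rfl, by omega⟩
    have hG : ((x, y) ∈ (PySem.List.pyRange 0 hei 1).flatMap (fun y =>
        (PySem.List.pyRange 0 wid 1).map (fun x => ((x : Int), (y : Int))))) := by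
      rw [← hK]
      exact (hmemK x y).mpr ⟨hx1, hx2, hy1, hy2⟩
    rw [hd5]
    simp only [List.foldl_cons, List.foldl_nil]
    rw [PySem.Dict.getD_insert, PySem.Dict.getD_insert, PySem.Dict.getD_insert,
        PySem.Dict.getD_insert, hd4, pv_getD_paint, hd3, pv_getD_paint, hd2, pv_getD_paint,
        hd1, pv_getD_paint, hd0, pv_getD_grid]
    simp only [hR, hL, hB, hT, iff_true_intro hG, if_true, Prod.mk.injEq]
    unfold pvCell
    split_ifs <;> first | rfl | omega
  have hnd5 : d5.keys.Nodup := by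
    rw [hk5]
    exact pv_nodup_keys_grid wid hei
  have hitems : d5.items = d5.keys.map (fun k => (k, d5.getD k ".")) :=
    PySem.Dict.items_eq_map_keys d5 hnd5 "."
  rw [hitems, hk5, hK, List.flatMap_def, List.flatMap_def, List.map_flatten, List.map_flatten,
      List.map_flatten]
  congr 1
  rw [List.map_map, List.map_map, List.map_map]
  apply List.map_congr_left
  intro y hy
  rw [PySem.List.mem_pyRange_one] at hy
  simp only [Function.comp_def, List.map_map]
  apply List.map_congr_left
  intro x hx
  rw [PySem.List.mem_pyRange_one] at hx
  simp only [hget x y hx.1 hx.2 hy.1 hy.2]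

-- ===== VERDICT (by name: the statement is the Claim_ definition above) =====
theorem build_rect_spec : Claim_equal_build_rect := by
  intro wid hei _hDom hPre
  obtain ⟨hw, hh⟩ := hPre
  unfold Spec_build_rect
  rw [pv_A_items wid hei hw hh, pv_B_items wid hei hw hh]
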